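-- pv_equiv track=rewrite | github.com/delfib/double-modular-generator | script/faults_injector.py | _find_insert_position_for_next_fault_mode
-- ===== SOURCE A (Python) =====
-- def _find_insert_position_for_next_fault_mode(lines, assign_idx):
--     """Find where to insert next(fault_mode) - after init statements"""
--     # Look for the last init() statement after ASSIGN
--     last_init_idx = assign_idx
--     for i in range(assign_idx + 1, len(lines)):
--         if 'init(' in lines[i]:
--             last_init_idx = i
--         elif 'next(' in lines[i]:
--             # Found first next(), insert before it
--             return i
--     # If no next() found, insert after last init
--     return last_init_idx + 1
-- ===== SOURCE B (Python) =====
-- def _find_insert_position_for_next_fault_mode(lines, assign_idx):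
--     """Find where to insert next(fault_mode) - after init statements.
--
--     Two separate passes instead of one fused short-circuit scan:
--     first look for the first line after assign_idx containing 'next('
--     (and not 'init(', which A's elif gives priority); failing that,
--     return one past the last 'init(' line, or assign_idx + 1.
--     """
--     idxs = range(assign_idx + 1, len(lines))
--     for i in idxs:
--         if 'next(' in lines[i] and 'init(' not in lines[i]:
--             return i
--     inits = [i for i in idxs if 'init(' in lines[i]]
--     return inits[-1] + 1 if inits else assign_idx + 1
-- ===== Notes on version B (the rewrite author's own statement) =====
-- stated objective: alternative
-- what changed: Replaced the single fused loop with a last-init accumulator and mid-loop early return by two separate passes: a first-match search for a 'next('-only line, then a filter for 'init(' lines whose last index (+1) is the fallback.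
import Mathlib
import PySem

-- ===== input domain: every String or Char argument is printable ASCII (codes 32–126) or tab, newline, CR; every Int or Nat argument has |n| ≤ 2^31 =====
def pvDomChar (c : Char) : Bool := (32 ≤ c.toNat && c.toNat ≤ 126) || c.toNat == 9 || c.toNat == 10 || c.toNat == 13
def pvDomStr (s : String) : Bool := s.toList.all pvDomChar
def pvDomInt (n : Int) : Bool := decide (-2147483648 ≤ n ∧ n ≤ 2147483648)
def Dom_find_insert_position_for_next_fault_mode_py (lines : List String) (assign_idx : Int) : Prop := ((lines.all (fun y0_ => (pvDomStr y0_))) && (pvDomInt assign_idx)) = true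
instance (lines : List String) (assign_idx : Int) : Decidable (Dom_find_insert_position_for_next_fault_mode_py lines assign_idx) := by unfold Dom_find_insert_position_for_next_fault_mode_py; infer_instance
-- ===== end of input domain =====

-- B replaces A's fused early-returning scan with two separate passes (first 'next('-only match,
-- else last 'init(' index + 1): a different decomposition of the same search, same cost.

-- ===== PORT A =====
-- the for-loop over range(assign_idx+1, len(lines)) with early return; `last` is last_init_idx
def pvLoopA (lines : List String) : List Int → Int → Int
  | [], last => last + 1
  | i :: rest, last =>
    match PySem.List.pyGet? lines i with
    | none => 0  -- IndexError in Python; excluded by Pre_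
    | some s =>
      if PySem.Str.isIn "init(" s then pvLoopA lines rest i
      else if PySem.Str.isIn "next(" s then i
      else pvLoopA lines rest last

def find_insert_position_for_next_fault_mode_py (lines : List String) (assign_idx : Int) : Int :=
  pvLoopA lines (PySem.List.pyRange (assign_idx + 1) (lines.length : Int) 1) assign_idx

-- ===== PORT B =====
def pvNextOnly (lines : List String) (i : Int) : Bool :=
  match PySem.List.pyGet? lines i with
  | some s => PySem.Str.isIn "next(" s && !PySem.Str.isIn "init(" s
  | none => false  -- Python B raises here; excluded by Pre_

def pvHasInit (lines : List String) (i : Int) : Bool :=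
  match PySem.List.pyGet? lines i with
  | some s => PySem.Str.isIn "init(" s
  | none => false

def find_insert_position_for_next_fault_mode_py_alt (lines : List String) (assign_idx : Int) : Int :=
  let idxs := PySem.List.pyRange (assign_idx + 1) (lines.length : Int) 1
  match idxs.find? (pvNextOnly lines) with
  | some i => i
  | none =>
    match (idxs.filter (pvHasInit lines)).getLast? with
    | some j => j + 1
    | none => assign_idx + 1

-- ===== PRECONDITION & SPEC =====
-- Pre_ excludes exactly the inputs where Python A raises IndexError
-- (a negative assign_idx so low that the loop's first index lines[assign_idx+1] is out of range);
-- Python B raises there too.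
def Pre_find_insert_position_for_next_fault_mode_py (lines : List String) (assign_idx : Int) : Prop :=
  -(lines.length : Int) ≤ assign_idx + 1 ∨ (lines.length : Int) ≤ assign_idx + 1
instance (lines : List String) (assign_idx : Int) : Decidable (Pre_find_insert_position_for_next_fault_mode_py lines assign_idx) := by unfold Pre_find_insert_position_for_next_fault_mode_py; infer_instance

def pvWitness_find_insert_position_for_next_fault_mode_py : List String × Int :=
  (["x = 0", "init(a)", "next(m)"], 0)

def Spec_find_insert_position_for_next_fault_mode_py (lines : List String) (assign_idx : Int) (out : Int) : Prop := out = find_insert_position_for_next_fault_mode_py_alt lines assign_idx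
instance (lines : List String) (assign_idx : Int) (out : Int) : Decidable (Spec_find_insert_position_for_next_fault_mode_py lines assign_idx out) := by unfold Spec_find_insert_position_for_next_fault_mode_py; infer_instance

-- ===== CLAIM (what is proved, stated in full; the proofs are below) =====
def Claim_equal_find_insert_position_for_next_fault_mode_py : Prop := ∀ (lines : List String) (assign_idx : Int), Dom_find_insert_position_for_next_fault_mode_py lines assign_idx → Pre_find_insert_position_for_next_fault_mode_py lines assign_idx → Spec_find_insert_position_for_next_fault_mode_py lines assign_idx (find_insert_position_for_next_fault_mode_py lines assign_idx)

-- ===== LEMMAS AND PROOFS =====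
-- A's fused loop equals B's two-pass decomposition, for any index list whose lookups all succeed.
lemma pvLoopA_eq (lines : List String) (idxs : List Int) (last : Int)
    (h : ∀ i ∈ idxs, (PySem.List.pyGet? lines i).isSome) :
    pvLoopA lines idxs last =
      match idxs.find? (pvNextOnly lines) with
      | some i => i
      | none =>
        match (idxs.filter (pvHasInit lines)).getLast? with
        | some j => j + 1
        | none => last + 1 := by
  induction idxs generalizing last with
  | nil => simp [pvLoopA]
  | cons i rest ih =>
    have hi : (PySem.List.pyGet? lines i).isSome := h i (List.mem_cons_self ..)
    obtain ⟨s, hs⟩ := Option.isSome_iff_exists.mp hi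
    have hrest : ∀ j ∈ rest, (PySem.List.pyGet? lines j).isSome :=
      fun j hj => h j (List.mem_cons_of_mem _ hj)
    by_cases hinit : PySem.Chars.isIn ['i','n','i','t','('] s.toList = true
    · have hno : pvNextOnly lines i = false := by simp [pvNextOnly, hs, hinit]
      have hhi : pvHasInit lines i = true := by simp [pvHasInit, hs, hinit]
      rw [show pvLoopA lines (i :: rest) last = pvLoopA lines rest i by
            simp [pvLoopA, hs, hinit]]
      rw [ih i hrest]
      simp only [List.find?_cons, hno, List.filter_cons, hhi]
      cases hf : (rest.find? (pvNextOnly lines)) with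
      | some k => simp
      | none =>
        cases hl : (rest.filter (pvHasInit lines)).getLast? with
        | some j => simp [List.getLast?_cons, hl, List.getLastD]
        | none =>
          have : rest.filter (pvHasInit lines) = [] := by
            cases hq : rest.filter (pvHasInit lines) with
            | nil => rfl
            | cons a l => rw [hq] at hl; simp [List.getLast?_cons] at hl
          simp [this]
    · by_cases hnext : PySem.Chars.isIn ['n','e','x','t','('] s.toList = true
      · have hyes : pvNextOnly lines i = true := by simp [pvNextOnly, hs, hinit, hnext]
        rw [show pvLoopA lines (i :: rest) last = i by simp [pvLoopA, hs, hinit, hnext]]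
        simp [List.find?_cons, hyes]
      · have hno : pvNextOnly lines i = false := by simp [pvNextOnly, hs, hnext]
        have hhi : pvHasInit lines i = false := by simp [pvHasInit, hs, hinit]
        rw [show pvLoopA lines (i :: rest) last = pvLoopA lines rest last by
              simp [pvLoopA, hs, hinit, hnext]]
        rw [ih last hrest]
        simp [List.find?_cons, hno, List.filter_cons, hhi]

lemma pv_all_some (lines : List String) (assign_idx : Int)
    (hpre : Pre_find_insert_position_for_next_fault_mode_py lines assign_idx) :
    ∀ i ∈ PySem.List.pyRange (assign_idx + 1) (lines.length : Int) 1,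
      (PySem.List.pyGet? lines i).isSome := by
  intro i hi
  rw [PySem.List.mem_pyRange_one] at hi
  rcases hpre with hpre | hpre
  · rw [Option.isSome_iff_ne_none]
    intro hnone
    rw [PySem.List.pyGet?_eq_none_iff] at hnone
    exact hnone ⟨by omega, by omega⟩
  · omega

-- ===== VERDICT (by name: the statement is the Claim_ definition above) =====
theorem find_insert_position_for_next_fault_mode_py_spec : Claim_equal_find_insert_position_for_next_fault_mode_py := by
  intro lines assign_idx _hdom hpre
  unfold Spec_find_insert_position_for_next_fault_mode_py
  unfold find_insert_position_for_next_fault_mode_py find_insert_position_for_next_fault_mode_py_alt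
  exact pvLoopA_eq lines _ assign_idx (pv_all_some lines assign_idx hpre)
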